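-- pv_equiv track=rewrite | github.com/blackviking27/DSA-450-Python | strings/5.py | shuffled
-- ===== SOURCE A (Python) =====
-- def shuffled(str1, str2, res):
--     i = j = k = 0
--     l1 = len(str1) # Length of the sub string 1
--     l2 = len(str2) # length of the sub string 2
--     lr = len(res) # length of the result string
--
--     # total length of string is greater than the length of both sub strings
--     if l1 + l2 < lr: return False
--
--     while k < lr:
--         if i < l1 and str1[i] == res[k]: i += 1
--         elif j < l2 and str2[j] == res[k]: j += 1
--         else:
--             # the ordered changed or some new character is there
--             return False
--         k += 1
--
--     # If we did not traverse the complete substrings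
--     if i < l1 or j < l2:
--         return False
--     else:
--         return True
-- ===== SOURCE B (Python) =====
-- def shuffled(str1, str2, res):
--     i = 0
--     leftover = []
--     for c in res:
--         if i < len(str1) and str1[i] == c:
--             i += 1
--         else:
--             leftover.append(c)
--     return i == len(str1) and ''.join(leftover) == str2
-- ===== Notes on version B (the rewrite author's own statement) =====
-- stated objective: simpler
-- what changed: Replaces the three-index while loop with its trailing guard and post-loop checks by a single greedy pass that matches str1 as a subsequence and collects every unmatched character, finishing with one equality test of the leftover against str2.
import Mathlib
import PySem

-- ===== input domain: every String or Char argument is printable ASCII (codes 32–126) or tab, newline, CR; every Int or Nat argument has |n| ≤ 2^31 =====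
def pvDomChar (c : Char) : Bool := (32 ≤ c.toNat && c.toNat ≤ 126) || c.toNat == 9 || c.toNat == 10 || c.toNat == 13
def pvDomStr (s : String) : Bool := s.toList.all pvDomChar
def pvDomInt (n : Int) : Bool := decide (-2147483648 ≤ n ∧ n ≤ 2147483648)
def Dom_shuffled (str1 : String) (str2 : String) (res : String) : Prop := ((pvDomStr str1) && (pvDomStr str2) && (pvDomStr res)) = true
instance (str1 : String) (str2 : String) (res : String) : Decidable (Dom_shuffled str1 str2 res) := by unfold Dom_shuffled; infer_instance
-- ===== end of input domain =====

-- B replaces A's three-index lockstep loop by one greedy subsequence pass for str1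
-- plus a final leftover-equals-str2 check (objective: simpler; same behaviour).

-- ===== PORT A =====
-- the while loop: returns none where Python 'return False' fires inside the loop,
-- otherwise the final (i, j)
def shuffledLoop (s1 s2 r : List Char) (i j k : Nat) : Option (Nat × Nat) :=
  if k < r.length then
    if i < s1.length ∧ s1.getD i ' ' = r.getD k ' ' then
      shuffledLoop s1 s2 r (i+1) j (k+1)
    else if j < s2.length ∧ s2.getD j ' ' = r.getD k ' ' then
      shuffledLoop s1 s2 r i (j+1) (k+1)
    else none
  else some (i, j)
termination_by r.length - k

def shuffled (str1 : String) (str2 : String) (res : String) : Bool :=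
  let s1 := str1.toList
  let s2 := str2.toList
  let r := res.toList
  if s1.length + s2.length < r.length then false
  else
    match shuffledLoop s1 s2 r 0 0 0 with
    | none => false
    | some (i, j) => if i < s1.length ∨ j < s2.length then false else true

-- ===== PORT B =====
-- the for loop of Source B: greedy match of str1, unmatched chars appended to `left`
def shuffledAltLoop (s1 : List Char) (r : List Char) (i : Nat) (left : List Char) :
    Nat × List Char :=
  match r with
  | [] => (i, left)
  | c :: rest =>
    if i < s1.length ∧ s1.getD i ' ' = c then shuffledAltLoop s1 rest (i+1) left
    else shuffledAltLoop s1 rest i (left ++ [c])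

def shuffled_alt (str1 : String) (str2 : String) (res : String) : Bool :=
  let p := shuffledAltLoop str1.toList res.toList 0 []
  decide (p.1 = str1.toList.length ∧ p.2 = str2.toList)

-- ===== PRECONDITION & SPEC =====
def Spec_shuffled (str1 : String) (str2 : String) (res : String) (out : Bool) : Prop := out = shuffled_alt str1 str2 res
instance (str1 : String) (str2 : String) (res : String) (out : Bool) : Decidable (Spec_shuffled str1 str2 res out) := by unfold Spec_shuffled; infer_instance

-- ===== CLAIM (what is proved, stated in full; the proofs are below) =====
def Claim_equal_shuffled : Prop := ∀ (str1 : String) (str2 : String) (res : String), Dom_shuffled str1 str2 res → Spec_shuffled str1 str2 res (shuffled str1 str2 res)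

-- ===== LEMMAS AND PROOFS =====

-- reference greedy pass: (remaining part of str1, leftover characters)
def refB (t1 rr : List Char) : List Char × List Char :=
  match t1, rr with
  | t1, [] => (t1, [])
  | [], c :: rest => let p := refB [] rest; (p.1, c :: p.2)
  | a :: t1', c :: rest =>
    if a = c then refB t1' rest
    else let p := refB (a :: t1') rest; (p.1, c :: p.2)

lemma refB_len (t1 rr : List Char) :
    (refB t1 rr).1.length ≤ t1.length ∧
    (refB t1 rr).1.length + rr.length = t1.length + (refB t1 rr).2.length := by
  induction rr generalizing t1 with
  | nil => simp [refB]
  | cons c rest ih =>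
    cases t1 with
    | nil =>
      obtain ⟨h1, h2⟩ := ih []
      simp only [List.length_nil] at h1 h2
      simp only [refB, List.length_cons, List.length_nil]
      omega
    | cons a t1' =>
      by_cases h : a = c
      · obtain ⟨h1, h2⟩ := ih t1'
        simp only [refB, h, if_true, List.length_cons]
        omega
      · obtain ⟨h1, h2⟩ := ih (a :: t1')
        simp only [List.length_cons] at h1 h2
        simp only [refB, h, if_false, List.length_cons]
        omega

lemma headMatch_drop (s1 : List Char) (i : Nat) (c : Char) (hi : i ≤ s1.length) :
    (i < s1.length ∧ s1.getD i ' ' = c) ↔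
      (∃ t, s1.drop i = c :: t ∧ s1.drop (i+1) = t) := by
  rcases Nat.lt_or_ge i s1.length with h | h
  · have hd : s1.drop i = s1[i] :: s1.drop (i+1) := by
      rw [List.drop_eq_getElem_cons h]
    constructor
    · rintro ⟨-, hc⟩
      refine ⟨s1.drop (i+1), ?_, rfl⟩
      rw [hd]; simp [List.getD_eq_getElem?_getD, List.getElem?_eq_getElem h] at hc
      simp [hc]
    · rintro ⟨t, ht, -⟩
      refine ⟨h, ?_⟩
      rw [hd] at ht
      simp [List.getD_eq_getElem?_getD, List.getElem?_eq_getElem h]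
      exact (List.cons.injEq _ _ _ _ ▸ ht).1
  · have : i = s1.length := le_antisymm hi h
    simp [this]

-- the post-loop result of A, expressed through refB on the remaining suffixes
lemma loopA_eq (s1 s2 r : List Char) :
    ∀ n k i j, r.length - k = n → k ≤ r.length → i ≤ s1.length → j ≤ s2.length →
    (match shuffledLoop s1 s2 r i j k with
     | none => false
     | some (i', j') => if i' < s1.length ∨ j' < s2.length then false else true) =
    ((refB (s1.drop i) (r.drop k)).1.isEmpty &&
      decide ((refB (s1.drop i) (r.drop k)).2 = s2.drop j)) := by
  intro n
  induction n with
  | zero =>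
    intro k i j hn hk hi hj
    have hke : k = r.length := by omega
    subst hke
    rw [shuffledLoop]
    simp only [lt_irrefl, if_false, List.drop_length, refB]
    have h1 : (s1.drop i).isEmpty = decide (¬ i < s1.length) := by
      cases Nat.lt_or_ge i s1.length with
      | inl h =>
        have hne : s1.drop i ≠ [] := by
          simp only [ne_eq, List.drop_eq_nil_iff]; omega
        simp [hne, h]
      | inr h =>
        have hnil : s1.drop i = [] := List.drop_eq_nil_iff.2 h
        simp [hnil]; omega
    have h2 : (([] : List Char) = s2.drop j) ↔ ¬ j < s2.length := by
      constructor
      · intro h; have := congrArg List.length h; simp at this; omega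
      · intro h; have : s2.length ≤ j := by omega
        simp [List.drop_eq_nil_iff.2 this]
    rw [h1]
    by_cases hil : i < s1.length <;> by_cases hjl : j < s2.length <;>
      simp [hil, hjl, h2]
  | succ n ih =>
    intro k i j hn hk hi hj
    have hklt : k < r.length := by omega
    have hdr : r.drop k = r.getD k ' ' :: r.drop (k+1) := by
      rw [List.drop_eq_getElem_cons hklt]
      simp [List.getD_eq_getElem?_getD, List.getElem?_eq_getElem hklt]
    set c := r.getD k ' ' with hc
    rw [shuffledLoop]
    simp only [hklt, if_true]
    by_cases h1 : i < s1.length ∧ s1.getD i ' ' = c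
    · -- str1 consumes the char
      obtain ⟨t, ht, ht'⟩ := (headMatch_drop s1 i c hi).1 h1
      obtain ⟨hi1, -⟩ := id h1
      rw [if_pos h1, ih (k+1) (i+1) j (by omega) (by omega) (by omega) hj]
      rw [hdr, ht, ht']
      simp [refB]
    · rw [if_neg h1]
      -- head of s1.drop i does not match c
      have hnom : ∀ t, s1.drop i = c :: t → False := by
        intro t ht
        exact h1 ((headMatch_drop s1 i c hi).2 ⟨t, ht, by
          rw [← List.drop_drop]; rw [ht]; simp⟩)
      have hrefB : refB (s1.drop i) (r.drop k) =
          ((refB (s1.drop i) (r.drop (k+1))).1,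
            c :: (refB (s1.drop i) (r.drop (k+1))).2) := by
        rw [hdr]
        cases hdi : s1.drop i with
        | nil => simp [refB]
        | cons a t =>
          have hne : a ≠ c := fun he => hnom t (by rw [hdi, he])
          simp [refB, hne]
      by_cases h2 : j < s2.length ∧ s2.getD j ' ' = c
      · -- str2 consumes the char
        obtain ⟨u, hu, hu'⟩ := (headMatch_drop s2 j c hj).1 h2
        obtain ⟨hj1, -⟩ := id h2
        have hrec : _ := ih (k+1) i (j+1) (by omega) (by omega) hi (by omega)
        rw [if_pos h2, hrec, hrefB, hu, hu']
        simp
      · -- A returns False; B's leftover can never equal s2.drop j here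
        rw [if_neg h2]
        rw [hrefB]
        have : ¬ (c :: (refB (s1.drop i) (r.drop (k+1))).2 = s2.drop j) := by
          intro he
          rcases Nat.lt_or_ge j s2.length with hjl | hjl
          · have hdj : s2.drop j = s2.getD j ' ' :: s2.drop (j+1) := by
              rw [List.drop_eq_getElem_cons hjl]
              simp [List.getD_eq_getElem?_getD, List.getElem?_eq_getElem hjl]
            rw [hdj] at he
            exact h2 ⟨hjl, ((List.cons.injEq _ _ _ _ ▸ he).1).symm⟩
          · have h0 : s2.drop j = [] := List.drop_eq_nil_iff.2 hjl
            rw [h0] at he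
            simp at he
        simp [this]

-- B's loop computes refB: final i is the consumed length, leftover is appended
lemma loopB_eq (s1 : List Char) :
    ∀ r i acc, i ≤ s1.length →
    shuffledAltLoop s1 r i acc =
      (s1.length - (refB (s1.drop i) r).1.length, acc ++ (refB (s1.drop i) r).2) := by
  intro r
  induction r with
  | nil =>
    intro i acc hi
    simp [shuffledAltLoop, refB]
    omega
  | cons c rest ih =>
    intro i acc hi
    rw [shuffledAltLoop]
    by_cases h1 : i < s1.length ∧ s1.getD i ' ' = c
    · obtain ⟨t, ht, ht'⟩ := (headMatch_drop s1 i c hi).1 h1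
      rw [if_pos h1, ih (i+1) acc (by omega), ht', ht]
      simp [refB]
    · rw [if_neg h1, ih i (acc ++ [c]) hi]
      have hrefB : refB (s1.drop i) (c :: rest) =
          ((refB (s1.drop i) rest).1, c :: (refB (s1.drop i) rest).2) := by
        cases hdi : s1.drop i with
        | nil => simp [refB]
        | cons a t =>
          have hne : a ≠ c := by
            intro he
            apply h1
            apply (headMatch_drop s1 i c hi).2
            exact ⟨t, by rw [hdi, he], by
              rw [← List.drop_drop, hdi, he]; simp⟩
          simp [refB, hne]
      rw [hrefB]
      simp

lemma shuffled_alt_char (str1 str2 res : String) :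
    shuffled_alt str1 str2 res =
      ((refB str1.toList res.toList).1.isEmpty &&
        decide ((refB str1.toList res.toList).2 = str2.toList)) := by
  unfold shuffled_alt
  rw [loopB_eq str1.toList res.toList 0 [] (by omega)]
  simp only [List.drop_zero, List.nil_append]
  have hle := (refB_len str1.toList res.toList).1
  by_cases hE : (refB str1.toList res.toList).1 = []
  · simp [hE]
  · have h0 : (refB str1.toList res.toList).1.length ≠ 0 := by
      simpa [List.length_eq_zero_iff] using hE
    have hne : ¬ (str1.length - (refB str1.toList res.toList).1.length
        = str1.length) := by
      have hlen : str1.toList.length = str1.length := by simp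
      omega
    simp [List.isEmpty_iff, hE, hne]

-- ===== VERDICT (by name: the statement is the Claim_ definition above) =====
theorem shuffled_spec : Claim_equal_shuffled := by
  intro str1 str2 res _
  unfold Spec_shuffled shuffled
  rw [shuffled_alt_char]
  by_cases hlen : str1.toList.length + str2.toList.length < res.toList.length
  · -- A's early-exit guard: B's final checks cannot both hold there
    simp only [hlen, if_true]
    have hl := refB_len str1.toList res.toList
    by_cases hE : (refB str1.toList res.toList).1.isEmpty
    · by_cases h2 : (refB str1.toList res.toList).2 = str2.toList
      · exfalso
        have : (refB str1.toList res.toList).1.length = 0 := by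
          simpa [List.isEmpty_iff, List.length_eq_zero_iff] using hE
        have := congrArg List.length h2
        omega
      · simp [h2]
    · simp [hE]
  · simp only [hlen, if_false]
    have := loopA_eq str1.toList str2.toList res.toList res.toList.length 0 0 0
      (by omega) (by omega) (by omega) (by omega)
    simpa using this
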